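-- pv_equiv track=rewrite | github.com/Ajanthy/Extractive_News_Summarization | features.py | sent_loc_score
-- ===== SOURCE A (Python) =====
-- def sent_loc_score(mylines):
--     count = len(mylines)
--     sent_location_score_matrix = []
--     for i in range(count):
--         if i == 1 or i == count - 1:
--             sent_location_score_matrix.append(1)
--         else:
--             sent_location_score_matrix.append(0)
--     return sent_location_score_matrix
-- ===== SOURCE B (Python) =====
-- def sent_loc_score(mylines):
--     n = len(mylines)
--     if n == 0:
--         return []
--     if n == 1:
--         return [1]
--     if n == 2:
--         return [0, 1]
--     return [0, 1] + [0] * (n - 3) + [1]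
-- ===== Notes on version B (the rewrite author's own statement) =====
-- stated objective: simpler
-- what changed: Replaces the per-element loop with an index-equality test at every position by a closed-form construction: a case split on the length, concatenating a fixed head, a bulk block of zeros and the trailing one.
import Mathlib
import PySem

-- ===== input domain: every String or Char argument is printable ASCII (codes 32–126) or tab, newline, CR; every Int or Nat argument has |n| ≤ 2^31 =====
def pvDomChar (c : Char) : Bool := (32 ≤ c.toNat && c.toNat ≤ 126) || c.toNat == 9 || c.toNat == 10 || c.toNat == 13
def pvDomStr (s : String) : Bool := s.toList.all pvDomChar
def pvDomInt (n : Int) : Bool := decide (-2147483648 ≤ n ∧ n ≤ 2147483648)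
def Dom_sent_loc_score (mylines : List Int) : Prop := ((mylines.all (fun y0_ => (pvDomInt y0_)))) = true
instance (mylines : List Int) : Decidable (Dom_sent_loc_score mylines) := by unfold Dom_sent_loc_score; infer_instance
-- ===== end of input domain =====

-- ===== PORT A =====
-- literal transliteration of A: loop over range(count), append 1 at i==1 or i==count-1 else 0
def sent_loc_score (mylines : List Int) : List Int :=
  let count : Int := mylines.length
  (PySem.List.pyRange 0 count 1).foldl
    (fun acc i => acc ++ [if i == 1 || i == count - 1 then (1 : Int) else 0]) []

-- ===== PORT B =====
-- B: closed-form construction — case split on the length, concatenating [0,1], a zero block and [1]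
def sent_loc_score_alt (mylines : List Int) : List Int :=
  let n := mylines.length
  if n = 0 then []
  else if n = 1 then [1]
  else if n = 2 then [0, 1]
  else [0, 1] ++ List.replicate (n - 3) 0 ++ [1]

-- ===== PRECONDITION & SPEC =====
def Spec_sent_loc_score (mylines : List Int) (out : List Int) : Prop := out = sent_loc_score_alt mylines
instance (mylines : List Int) (out : List Int) : Decidable (Spec_sent_loc_score mylines out) := by unfold Spec_sent_loc_score; infer_instance

-- ===== CLAIM (what is proved, stated in full; the proofs are below) =====
def Claim_equal_sent_loc_score : Prop := ∀ (mylines : List Int), Dom_sent_loc_score mylines → Spec_sent_loc_score mylines (sent_loc_score mylines)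

-- ===== LEMMAS AND PROOFS =====

lemma build (m : Nat) :
    List.map (fun x : Int => if (x == 1 || x == ((m + 3 : Nat) : Int) - 1) = true then (1 : Int) else 0)
      (List.map (fun k : Nat => (k : Int)) (List.range (m + 3)))
    = [0, 1] ++ List.replicate m (0 : Int) ++ [1] := by
  apply List.ext_getElem
  · simp
  · intro k hk hk'
    simp only [List.length_map, List.length_range] at hk
    rw [List.getElem_map, List.getElem_map, List.getElem_range]
    simp only [List.cons_append, List.nil_append] at hk' ⊢
    match k, hk with
    | 0, _ =>
      have : ¬ (((0 : Nat) : Int) == 1 || ((0 : Nat) : Int) == ((m + 3 : Nat) : Int) - 1) = true := by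
        simp; omega
      rw [if_neg this]; simp
    | 1, _ =>
      have : (((1 : Nat) : Int) == 1 || ((1 : Nat) : Int) == ((m + 3 : Nat) : Int) - 1) = true := by
        simp
      rw [if_pos this]; simp
    | (j + 2), hk =>
      simp only [List.getElem_cons_succ]
      by_cases hj : j < m
      · rw [List.getElem_append_left (by simpa)]
        have : ¬ (((j + 2 : Nat) : Int) == 1 || ((j + 2 : Nat) : Int) == ((m + 3 : Nat) : Int) - 1) = true := by
          simp; omega
        rw [if_neg this]; simp
      · have hje : j = m := by omega
        rw [List.getElem_append_right (by simp; omega)]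
        have : (((j + 2 : Nat) : Int) == 1 || ((j + 2 : Nat) : Int) == ((m + 3 : Nat) : Int) - 1) = true := by
          simp; omega
        rw [if_pos this]
        simp [hje]

lemma ports_eq (mylines : List Int) :
    sent_loc_score mylines = sent_loc_score_alt mylines := by
  simp only [sent_loc_score, sent_loc_score_alt,
    PySem.List.foldl_append_singleton_eq_map, PySem.List.pyRange_zero_natCast,
    List.nil_append]
  generalize mylines.length = n
  match n with
  | 0 => simp
  | 1 => simp
  | 2 => decide
  | (m + 3) =>
    have h0 : ¬ m + 3 = 0 := by omega
    have h1 : ¬ m + 3 = 1 := by omega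
    have h2 : ¬ m + 3 = 2 := by omega
    rw [if_neg h0, if_neg h1, if_neg h2]
    simpa using build m

-- ===== VERDICT (by name: the statement is the Claim_ definition above) =====
theorem sent_loc_score_spec : Claim_equal_sent_loc_score := by
  intro mylines _
  unfold Spec_sent_loc_score
  exact ports_eq mylines
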